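-- pv_equiv track=rewrite | github.com/BottumJ/diabetes-research-hub | Analysis/Scripts/build_extracted_evidence.py | extract_inflammatory_markers
-- ===== SOURCE A (Python) =====
-- from collections import defaultdict
--
-- def extract_inflammatory_markers(inflammatory_data):
--     """Categorize inflammatory markers by type."""
--     markers = defaultdict(list)
--
--     for item in inflammatory_data:
--         matched = item.get('matched_text', '').upper()
--
--         if 'CRP' in matched or 'C-REACTIVE' in matched:
--             markers['CRP'].append(item)
--         elif 'TNF' in matched:
--             markers['TNF-alpha'].append(item)
--         elif 'IL-1' in matched:
--             markers['IL-1'].append(item)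
--         elif 'IL-6' in matched:
--             markers['IL-6'].append(item)
--         elif 'NLRP3' in matched or 'INFLAMMASOME' in matched:
--             markers['NLRP3'].append(item)
--         else:
--             markers['Other'].append(item)
--
--     return markers
-- ===== SOURCE B (Python) =====
-- from collections import defaultdict
--
-- _PRIORITY = ('CRP', 'TNF-alpha', 'IL-1', 'IL-6', 'NLRP3')
-- _SUBS = {'CRP': ('CRP', 'C-REACTIVE'), 'TNF-alpha': ('TNF',), 'IL-1': ('IL-1',),
--          'IL-6': ('IL-6',), 'NLRP3': ('NLRP3', 'INFLAMMASOME')}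
--
--
-- def _label(item):
--     u = item.get('matched_text', '').upper()
--     hits = [lab for lab in _PRIORITY if any(s in u for s in _SUBS[lab])]
--     return hits[0] if hits else 'Other'
--
--
-- def extract_inflammatory_markers(inflammatory_data):
--     """Categorize inflammatory markers: label every item first, then build one
--     group per distinct label with a filter pass (staged, instead of one
--     accumulating loop)."""
--     labels = [_label(item) for item in inflammatory_data]
--     markers = defaultdict(list)
--     for lab in dict.fromkeys(labels):
--         markers[lab] = [item for item, l in zip(inflammatory_data, labels) if l == lab]
--     return markers
-- ===== Notes on version B (the rewrite author's own statement) =====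
-- stated objective: alternative
-- what changed: Replaces A's single accumulating loop (if/elif chain mutating a dict per item) with a staged pipeline: first a pass computing every item's label via a priority-filtered hit list, then dict.fromkeys for the distinct labels in first-occurrence order, then one filter pass per distinct label to build its group.
import Mathlib
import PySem

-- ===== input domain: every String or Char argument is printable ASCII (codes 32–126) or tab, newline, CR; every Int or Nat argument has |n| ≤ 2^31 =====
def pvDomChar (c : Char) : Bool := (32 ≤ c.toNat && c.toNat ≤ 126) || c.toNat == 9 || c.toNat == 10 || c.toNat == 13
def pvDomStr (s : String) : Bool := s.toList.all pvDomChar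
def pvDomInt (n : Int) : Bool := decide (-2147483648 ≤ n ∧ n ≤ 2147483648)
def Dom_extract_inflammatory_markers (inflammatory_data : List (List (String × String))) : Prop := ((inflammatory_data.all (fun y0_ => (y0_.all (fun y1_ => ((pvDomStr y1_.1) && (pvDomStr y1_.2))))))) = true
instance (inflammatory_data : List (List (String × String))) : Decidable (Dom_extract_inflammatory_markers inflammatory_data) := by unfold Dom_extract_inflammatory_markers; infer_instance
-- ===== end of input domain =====

-- B stages the work (label pass, ordered dedup of labels, one filter pass per distinct label) instead of A's single accumulating loop; same cost class.
-- ===== PORT A =====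
def extract_inflammatory_markers (inflammatory_data : List (List (String × String))) : List (String × List (List (String × String))) :=
  (inflammatory_data.foldl (fun markers item =>
    let matched := PySem.Str.upper ((PySem.Dict.mk item).getD "matched_text" "")
    if PySem.Str.isIn "CRP" matched || PySem.Str.isIn "C-REACTIVE" matched then
      markers.modify "CRP" [] (· ++ [item])
    else if PySem.Str.isIn "TNF" matched then
      markers.modify "TNF-alpha" [] (· ++ [item])
    else if PySem.Str.isIn "IL-1" matched then
      markers.modify "IL-1" [] (· ++ [item])
    else if PySem.Str.isIn "IL-6" matched then
      markers.modify "IL-6" [] (· ++ [item])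
    else if PySem.Str.isIn "NLRP3" matched || PySem.Str.isIn "INFLAMMASOME" matched then
      markers.modify "NLRP3" [] (· ++ [item])
    else
      markers.modify "Other" [] (· ++ [item])) PySem.Dict.empty).items

-- ===== PORT B =====
def pvPriority : List String := ["CRP", "TNF-alpha", "IL-1", "IL-6", "NLRP3"]

def pvSubs : PySem.Dict String (List String) :=
  PySem.Dict.ofList [("CRP", ["CRP", "C-REACTIVE"]), ("TNF-alpha", ["TNF"]), ("IL-1", ["IL-1"]),
                     ("IL-6", ["IL-6"]), ("NLRP3", ["NLRP3", "INFLAMMASOME"])]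

def pvLabel (item : List (String × String)) : String :=
  let u := PySem.Str.upper ((PySem.Dict.mk item).getD "matched_text" "")
  let hits := pvPriority.filter (fun lab => (pvSubs.getD lab []).any (fun s => PySem.Str.isIn s u))
  (hits.head?).getD "Other"

def extract_inflammatory_markers_alt (inflammatory_data : List (List (String × String))) : List (String × List (List (String × String))) :=
  let labels := inflammatory_data.map pvLabel
  ((PySem.List.dedup labels).foldl (fun markers lab =>
      markers.insert lab (((inflammatory_data.zip labels).filter (fun p => p.2 == lab)).map (·.1)))
    PySem.Dict.empty).items

-- ===== PRECONDITION & SPEC =====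
def Spec_extract_inflammatory_markers (inflammatory_data : List (List (String × String))) (out : List (String × List (List (String × String)))) : Prop := out = extract_inflammatory_markers_alt inflammatory_data
instance (inflammatory_data : List (List (String × String))) (out : List (String × List (List (String × String)))) : Decidable (Spec_extract_inflammatory_markers inflammatory_data out) := by unfold Spec_extract_inflammatory_markers; infer_instance

-- ===== CLAIM (what is proved, stated in full; the proofs are below) =====
def Claim_equal_extract_inflammatory_markers : Prop := ∀ (inflammatory_data : List (List (String × String))), Dom_extract_inflammatory_markers inflammatory_data → Spec_extract_inflammatory_markers inflammatory_data (extract_inflammatory_markers inflammatory_data)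

-- ===== LEMMAS AND PROOFS =====
-- A's if/elif chain computes the same label as B's priority-filtered hit list.
theorem pvLabel_chain (item : List (String × String)) :
    pvLabel item =
      (let matched := PySem.Str.upper ((PySem.Dict.mk item).getD "matched_text" "")
       if PySem.Str.isIn "CRP" matched || PySem.Str.isIn "C-REACTIVE" matched then "CRP"
       else if PySem.Str.isIn "TNF" matched then "TNF-alpha"
       else if PySem.Str.isIn "IL-1" matched then "IL-1"
       else if PySem.Str.isIn "IL-6" matched then "IL-6"
       else if PySem.Str.isIn "NLRP3" matched || PySem.Str.isIn "INFLAMMASOME" matched then "NLRP3"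
       else "Other") := by
  have g1 : pvSubs.getD "CRP" [] = ["CRP", "C-REACTIVE"] := by decide
  have g2 : pvSubs.getD "TNF-alpha" [] = ["TNF"] := by decide
  have g3 : pvSubs.getD "IL-1" [] = ["IL-1"] := by decide
  have g4 : pvSubs.getD "IL-6" [] = ["IL-6"] := by decide
  have g5 : pvSubs.getD "NLRP3" [] = ["NLRP3", "INFLAMMASOME"] := by decide
  unfold pvLabel pvPriority
  set m := PySem.Str.upper ((PySem.Dict.mk item).getD "matched_text" "") with hm
  simp only [g1, g2, g3, g4, g5, List.filter_cons, List.filter_nil,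
    List.any_cons, List.any_nil, Bool.or_false, PySem.Str.isIn]
  by_cases hc : PySem.Chars.isIn ['C','R','P'] m.toList = true <;>
  by_cases hr : PySem.Chars.isIn ['C','-','R','E','A','C','T','I','V','E'] m.toList = true <;>
  by_cases ht : PySem.Chars.isIn ['T','N','F'] m.toList = true <;>
  by_cases h1 : PySem.Chars.isIn ['I','L','-','1'] m.toList = true <;>
  by_cases h6 : PySem.Chars.isIn ['I','L','-','6'] m.toList = true <;>
  by_cases hn : PySem.Chars.isIn ['N','L','R','P','3'] m.toList = true <;>
  by_cases hi : PySem.Chars.isIn ['I','N','F','L','A','M','M','A','S','O','M','E'] m.toList = true <;>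
  simp [hc, hr, ht, h1, h6, hn, hi]

-- A's loop is a modify-by-key fold over pvLabel.
theorem stepA_eq :
    (fun (markers : PySem.Dict String (List (List (String × String)))) item =>
      let matched := PySem.Str.upper ((PySem.Dict.mk item).getD "matched_text" "")
      if PySem.Str.isIn "CRP" matched || PySem.Str.isIn "C-REACTIVE" matched then
        markers.modify "CRP" [] (· ++ [item])
      else if PySem.Str.isIn "TNF" matched then
        markers.modify "TNF-alpha" [] (· ++ [item])
      else if PySem.Str.isIn "IL-1" matched then
        markers.modify "IL-1" [] (· ++ [item])
      else if PySem.Str.isIn "IL-6" matched then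
        markers.modify "IL-6" [] (· ++ [item])
      else if PySem.Str.isIn "NLRP3" matched || PySem.Str.isIn "INFLAMMASOME" matched then
        markers.modify "NLRP3" [] (· ++ [item])
      else
        markers.modify "Other" [] (· ++ [item]))
    = (fun markers item => markers.modify (pvLabel item) [] (· ++ [item])) := by
  funext markers item
  rw [pvLabel_chain]
  dsimp only
  split_ifs <;> rfl

-- both filter views pick exactly the items labelled k, in order
theorem filter_views_eq (k : String) (xs : List (List (String × String))) :
    ((xs.map (fun it => (pvLabel it, it))).filter (fun p => p.1 == k)).map (·.2)
      = ((xs.zip (xs.map pvLabel)).filter (fun p => p.2 == k)).map (·.1) := by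
  induction xs with
  | nil => rfl
  | cons x t ih =>
      simp only [List.map_cons, List.zip_cons_cons, List.filter_cons]
      by_cases hx : pvLabel x == k
      · simp [hx, ih]
      · simp [hx, ih]

-- getD of the modify-by-key fold: the items whose label is k, in order.
theorem getD_fold_label (data : List (List (String × String))) (k : String) :
    ((data.foldl (fun d item => d.modify (pvLabel item) [] (· ++ [item])) PySem.Dict.empty).getD k [])
      = ((data.zip (data.map pvLabel)).filter (fun p => p.2 == k)).map (·.1) := by
  have h := PySem.Dict.getD_foldl_modify_append
      (l := data.map (fun it => (pvLabel it, it))) (d := (PySem.Dict.empty : PySem.Dict String (List (List (String × String))))) (c := k)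
  rw [List.foldl_map] at h
  simp only [PySem.Dict.getD_empty, List.nil_append] at h
  rw [h, filter_views_eq]

theorem extract_inflammatory_markers_eq (data : List (List (String × String))) :
    extract_inflammatory_markers data = extract_inflammatory_markers_alt data := by
  unfold extract_inflammatory_markers extract_inflammatory_markers_alt
  dsimp only
  rw [stepA_eq]
  set D := data.foldl (fun d item => d.modify (pvLabel item) [] (· ++ [item])) PySem.Dict.empty with hD
  have hnd : D.keys.Nodup := by
    rw [hD]
    exact PySem.Dict.nodup_keys_foldl_modify_key data pvLabel [] (fun _ it l => l ++ [it]) _ PySem.Dict.nodup_keys_empty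
  have hkeys : D.keys = PySem.List.dedup (data.map pvLabel) := by
    rw [hD, PySem.Dict.keys_foldl_modify_key]
    simp [PySem.Set.update_nil_left]
  have hfresh : ∀ lab ∈ PySem.List.dedup (data.map pvLabel),
      (PySem.Dict.empty : PySem.Dict String (List (List (String × String)))).contains lab = false := by
    intro lab _; exact PySem.Dict.contains_empty lab
  rw [PySem.Dict.items_eq_map_keys D hnd []]
  have h2 := PySem.Dict.items_foldl_insert_fresh (PySem.List.dedup (data.map pvLabel)) (fun a => a)
        (fun lab => ((data.zip (data.map pvLabel)).filter (fun p => p.2 == lab)).map (·.1))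
        PySem.Dict.empty hfresh (by simp)
  rw [show (PySem.Dict.empty : PySem.Dict String (List (List (String × String)))).items = [] from rfl,
      List.nil_append] at h2
  rw [hkeys, h2]
  exact List.map_congr_left (fun k _ => by rw [getD_fold_label])

-- ===== VERDICT (by name: the statement is the Claim_ definition above) =====
theorem extract_inflammatory_markers_spec : Claim_equal_extract_inflammatory_markers := by
  intro data _
  unfold Spec_extract_inflammatory_markers
  exact extract_inflammatory_markers_eq data
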